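-- pv_equiv track=rewrite | github.com/joanarvs/ATP2022 | TPC7/tpc7.py | distCurso
-- ===== SOURCE A (Python) =====
-- def distCurso(alunos):
--     dici = {}
--     for id, nome, curso, *_ in alunos:
--         if curso in dici.keys():
--             dici[curso] = dici[curso] + 1
--         else:
--             dici[curso] = 1
--     distCurso = sorted(dici.items(), key = lambda x: x[0])
--     novoDici = dict(distCurso)
--     return novoDici
-- ===== SOURCE B (Python) =====
-- from itertools import groupby
--
-- def distCurso(alunos):
--     cursos = []
--     for id, nome, curso, *_ in alunos:
--         cursos.append(curso)
--     cursos.sort()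
--     return {curso: len(list(grp)) for curso, grp in groupby(cursos)}
-- ===== Notes on version B (the rewrite author's own statement) =====
-- stated objective: alternative
-- what changed: Replaces A's hash-count (dict membership test + increment) followed by sorting the dict items by key with a sort-then-group pass: B extracts the course names, sorts them, and emits each consecutive run with its length via itertools.groupby.
import Mathlib
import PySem

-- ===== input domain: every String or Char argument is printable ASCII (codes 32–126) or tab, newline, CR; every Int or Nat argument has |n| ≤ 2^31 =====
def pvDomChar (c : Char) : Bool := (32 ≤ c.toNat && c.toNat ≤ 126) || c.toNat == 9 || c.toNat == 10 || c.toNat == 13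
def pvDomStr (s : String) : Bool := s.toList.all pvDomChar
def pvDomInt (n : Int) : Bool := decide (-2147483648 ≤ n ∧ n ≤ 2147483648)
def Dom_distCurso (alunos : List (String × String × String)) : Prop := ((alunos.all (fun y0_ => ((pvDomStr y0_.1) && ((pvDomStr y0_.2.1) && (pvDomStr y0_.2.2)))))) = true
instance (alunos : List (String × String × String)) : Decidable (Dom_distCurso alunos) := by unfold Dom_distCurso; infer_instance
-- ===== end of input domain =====

-- B replaces A's hash-count-then-sort-keys by collecting the course names, sorting them,
-- and counting consecutive runs (sort-then-group); objective: alternative algorithm, same result.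

-- ===== PORT A =====
-- for id, nome, curso, *_ in alunos: if curso in dici: dici[curso] += 1 else: dici[curso] = 1
-- (dici[curso] on a present key is ported as getD curso 0, exact since the key is contained)
def distCurso (alunos : List (String × String × String)) : List (String × Int) :=
  let dici : PySem.Dict String Int :=
    alunos.foldl (fun dici a =>
      let curso := a.2.2
      if dici.contains curso then dici.insert curso (dici.getD curso 0 + 1)
      else dici.insert curso 1) PySem.Dict.empty
  let distCurso := PySem.List.sorted dici.items (fun x => x.1)
  let novoDici := PySem.Dict.ofList distCurso
  novoDici.items

-- ===== PORT B =====
-- itertools.groupby over a sorted list: each step emits the head with its run length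
-- (len(list(grp))) and recurses on the rest of the list after the run.
def pyGroupCounts : List String → List (String × Int)
  | [] => []
  | x :: xs =>
      (x, (1 + (xs.takeWhile (· == x)).length : Int)) :: pyGroupCounts (xs.dropWhile (· == x))
termination_by l => l.length
decreasing_by simpa using Nat.lt_succ_of_le (List.length_dropWhile_le _ _)

def distCurso_alt (alunos : List (String × String × String)) : List (String × Int) :=
  let cursos : List String :=
    alunos.foldl (fun cursos a => cursos ++ [a.2.2]) []
  let cursos := PySem.List.sorted cursos (fun x => x)
  pyGroupCounts cursos

-- ===== PRECONDITION & SPEC =====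
def Spec_distCurso (alunos : List (String × String × String)) (out : List (String × Int)) : Prop := out = distCurso_alt alunos
instance (alunos : List (String × String × String)) (out : List (String × Int)) : Decidable (Spec_distCurso alunos out) := by unfold Spec_distCurso; infer_instance

-- ===== CLAIM (what is proved, stated in full; the proofs are below) =====
def Claim_equal_distCurso : Prop := ∀ (alunos : List (String × String × String)), Dom_distCurso alunos → Spec_distCurso alunos (distCurso alunos)

-- ===== LEMMAS AND PROOFS =====

-- A's counting loop is Counter(courses)
theorem distCurso_fold_eq_counter (alunos : List (String × String × String)) :
    alunos.foldl (fun dici a =>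
      let curso := a.2.2
      if dici.contains curso then dici.insert curso (dici.getD curso 0 + 1)
      else dici.insert curso 1) PySem.Dict.empty
    = PySem.Dict.counter (alunos.map (fun a => a.2.2)) := by
  rw [← PySem.Dict.foldl_insert_getD_add_one_eq_counter, List.foldl_map]
  congr 1
  funext d a
  by_cases h : d.contains a.2.2
  · simp [h]
  · rw [if_neg (by simpa using h),
      PySem.Dict.getD_of_not_contains d 0 (by simpa using h)]
    norm_num

-- properties of pyGroupCounts on a weakly increasing list
theorem pyGroupCounts_sorted (l : List String) (h : l.Pairwise (· ≤ ·)) :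
    (∀ p ∈ pyGroupCounts l, p.2 = (l.count p.1 : Int)) ∧
    (pyGroupCounts l).Pairwise (fun a b => a.1 < b.1) ∧
    (∀ k, k ∈ (pyGroupCounts l).map (fun p => p.1) ↔ k ∈ l) := by
  induction l using pyGroupCounts.induct with
  | case1 => simp [pyGroupCounts]
  | case2 x xs ih =>
    have hxs : xs.takeWhile (· == x) ++ xs.dropWhile (· == x) = xs :=
      List.takeWhile_append_dropWhile
    have hpxs : xs.Pairwise (· ≤ ·) := h.of_cons
    have hxle : ∀ z ∈ xs, x ≤ z := fun z hz => List.rel_of_pairwise_cons h hz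
    have hpd : (xs.dropWhile (· == x)).Pairwise (· ≤ ·) :=
      hpxs.sublist (List.dropWhile_sublist _)
    have ht : ∀ z ∈ xs.takeWhile (· == x), z = x := by
      intro z hz
      have hb := List.mem_takeWhile_imp (p := (· == x)) hz
      exact eq_of_beq hb
    have hmem : ∀ k, k ∈ xs ↔ k ∈ xs.takeWhile (· == x) ∨ k ∈ xs.dropWhile (· == x) :=
      fun k => by rw [← List.mem_append, hxs]
    have hxd : ∀ z ∈ xs.dropWhile (· == x), x < z := by
      intro z hz
      rcases hd : xs.dropWhile (· == x) with _ | ⟨y, r⟩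
      · simp [hd] at hz
      · have hy := List.head_dropWhile_not (· == x) (l := xs) (by simp [hd])
        simp only [hd, List.head_cons] at hy
        have hyx : x < y := by
          have hymem : y ∈ xs := by
            have hy' : y ∈ xs.dropWhile (· == x) := by
              rw [hd]; exact List.mem_cons_self
            exact (List.dropWhile_sublist _).mem hy'

          exact lt_of_le_of_ne (hxle y hymem) (fun e => by rw [← e] at hy; simp at hy)
        rw [hd] at hz
        rcases List.mem_cons.mp hz with rfl | hz
        · exact hyx
        · have hyz : y ≤ z := by
            have hpd2 := hpd
            rw [hd] at hpd2
            exact List.rel_of_pairwise_cons hpd2 hz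
          exact lt_of_lt_of_le hyx hyz
    obtain ⟨ih1, ih2, ih3⟩ := ih hpd
    have hxnotd : x ∉ xs.dropWhile (· == x) := fun hmem => lt_irrefl x (hxd x hmem)
    have hcx : (x :: xs).count x = 1 + (xs.takeWhile (· == x)).length := by
      have h0 : xs.count x
          = (xs.takeWhile (· == x)).count x + (xs.dropWhile (· == x)).count x := by
        conv_lhs => rw [← hxs]
        exact List.count_append ..
      have h1 : (xs.takeWhile (· == x)).count x = (xs.takeWhile (· == x)).length :=
        List.count_eq_length.mpr (fun b hb => (ht b hb).symm)
      have h2 : (xs.dropWhile (· == x)).count x = 0 := List.count_eq_zero.mpr hxnotd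
      rw [List.count_cons]
      simp only [beq_self_eq_true, if_true]
      omega
    refine ⟨?_, ?_, ?_⟩
    · intro p hp
      rw [pyGroupCounts] at hp
      rcases List.mem_cons.mp hp with rfl | hp
      · simp [hcx]
      · have hp1 : p.1 ∈ xs.dropWhile (· == x) :=
          (ih3 p.1).mp (List.mem_map_of_mem hp)
        have hlt := hxd p.1 hp1
        have hcnt : (x :: xs).count p.1 = (xs.dropWhile (· == x)).count p.1 := by
          have h0 : xs.count p.1
              = (xs.takeWhile (· == x)).count p.1 + (xs.dropWhile (· == x)).count p.1 := by
            conv_lhs => rw [← hxs]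
            exact List.count_append ..
          have h1 : (xs.takeWhile (· == x)).count p.1 = 0 :=
            List.count_eq_zero.mpr (fun hm => absurd (ht _ hm) hlt.ne')
          rw [List.count_cons]
          simp only [beq_iff_eq, if_neg hlt.ne]
          omega
        rw [hcnt]
        exact ih1 p hp
    · rw [pyGroupCounts]
      refine List.pairwise_cons.mpr ⟨?_, ih2⟩
      intro q hq
      exact hxd q.1 ((ih3 q.1).mp (List.mem_map_of_mem hq))
    · intro k
      rw [pyGroupCounts, List.map_cons]
      simp only [List.mem_cons, ih3]
      constructor
      · rintro (rfl | hk)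
        · exact Or.inl rfl
        · exact Or.inr ((hmem k).mpr (Or.inr hk))
      · rintro (rfl | hk)
        · exact Or.inl rfl
        · rcases (hmem k).mp hk with h1 | h1
          · exact Or.inl (ht _ h1)
          · exact Or.inr h1

-- ===== VERDICT (by name: the statement is the Claim_ definition above) =====
-- the fst-projection of pyGroupCounts of a sorted list is strictly increasing, hence Nodup
theorem pyGroupCounts_fst_nodup (l : List String) (h2 : (pyGroupCounts l).Pairwise (fun a b => a.1 < b.1)) :
    ((pyGroupCounts l).map (fun p => p.1)).Nodup :=
  (List.pairwise_map.mpr h2).imp ne_of_lt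

-- ===== VERDICT (by name: the statement is the Claim_ definition above) =====
theorem distCurso_spec : Claim_equal_distCurso := by
  unfold Claim_equal_distCurso
  intro alunos _
  unfold Spec_distCurso distCurso distCurso_alt
  rw [distCurso_fold_eq_counter, PySem.List.foldl_append_singleton_eq_map]
  simp only [List.nil_append]
  set cs := alunos.map (fun a => a.2.2) with hcs
  set s := PySem.List.sorted cs (fun x => x) with hsdef
  have hs : s.Pairwise (· ≤ ·) := by
    have := PySem.List.sorted_pairwise cs (fun x => x)
    simpa using this
  obtain ⟨L1, L2, L3⟩ := pyGroupCounts_sorted s hs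
  have hnd : ((pyGroupCounts s).map (fun p => p.1)).Nodup := pyGroupCounts_fst_nodup s L2
  -- the groups are exactly the pairs (k, count of k in cs)
  have hgrp_eq : pyGroupCounts s
      = ((pyGroupCounts s).map (fun p => p.1)).map (fun k => (k, (cs.count k : Int))) := by
    rw [List.map_map]
    conv_lhs => rw [← List.map_id (pyGroupCounts s)]
    refine List.map_congr_left (fun p hp => ?_)
    have h2 := L1 p hp
    have hsc : s.count p.1 = cs.count p.1 :=
      (PySem.List.sorted_perm cs (fun x => x) false).count_eq p.1
    have : p.2 = (cs.count p.1 : Int) := by rw [h2, hsc]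
    exact Prod.ext rfl this
  have hfst : ((pyGroupCounts s).map (fun p => p.1)).Perm (PySem.Set.ofList cs) := by
    refine (List.perm_ext_iff_of_nodup hnd (PySem.Set.nodup_ofList cs)).mpr (fun k => ?_)
    rw [L3, PySem.Set.mem_ofList]
    exact PySem.List.mem_sorted cs (fun x => x) false k
  have hperm : (pyGroupCounts s).Perm ((PySem.Dict.counter cs).items) := by
    rw [PySem.Dict.items_counter]
    conv_lhs => rw [hgrp_eq]
    exact hfst.map _
  have hsorted : PySem.List.sorted ((PySem.Dict.counter cs).items) (fun x => x.1)
      = pyGroupCounts s :=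
    PySem.List.sorted_eq_of_perm_of_pairwise_lt _ _ _ hperm L2
  rw [hsorted]
  -- dict(pairs) of a strictly-key-increasing pair list keeps exactly those items
  have : PySem.Dict.ofList (pyGroupCounts s) =
      (pyGroupCounts s).foldl (fun d p => d.insert p.1 p.2) PySem.Dict.empty := rfl
  rw [this, PySem.Dict.items_foldl_insert_fresh (pyGroupCounts s) (fun p => p.1) (fun p => p.2)
        PySem.Dict.empty (fun a _ => PySem.Dict.contains_empty a.1) hnd]
  simp [PySem.Dict.empty]
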